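-- pv_equiv track=rewrite | github.com/KChuene/Hill-Cipher | lib/matrixops.py | optimal_expansion_col
-- ===== SOURCE A (Python) =====
-- def optimal_expansion_col(A):
--     # Find the column with the most zeros
--     maxCol = 0
--     max = 0
--     for col in range(0, len(A)):
--         count = 0
--         for row in range(0, len(A)):
--             if A[row][col] == 0:
--                     count += 1
--         if count > max:
--             maxCol = col
--             max = count
--     # Return the column index and the number of zeros
--     return maxCol, max
-- ===== SOURCE B (Python) =====
-- def optimal_expansion_col(A):
--     # Pass 1: build a per-column zero-count table, traversing row-major.
--     n = len(A)
--     counts = [0] * n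
--     for row in range(n):
--         counts = [counts[col] + (1 if A[row][col] == 0 else 0) for col in range(n)]
--     # Pass 2: first column with the strictly largest count.
--     maxCol = 0
--     mx = 0
--     for col in range(n):
--         if counts[col] > mx:
--             maxCol = col
--             mx = counts[col]
--     return maxCol, mx
-- ===== Notes on version B (the rewrite author's own statement) =====
-- stated objective: alternative
-- what changed: B first builds a per-column zero-count table in one row-major sweep and then selects the best column in a separate scan over the table, instead of A's column-major nested loops that recount each column inline.
import Mathlib
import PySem

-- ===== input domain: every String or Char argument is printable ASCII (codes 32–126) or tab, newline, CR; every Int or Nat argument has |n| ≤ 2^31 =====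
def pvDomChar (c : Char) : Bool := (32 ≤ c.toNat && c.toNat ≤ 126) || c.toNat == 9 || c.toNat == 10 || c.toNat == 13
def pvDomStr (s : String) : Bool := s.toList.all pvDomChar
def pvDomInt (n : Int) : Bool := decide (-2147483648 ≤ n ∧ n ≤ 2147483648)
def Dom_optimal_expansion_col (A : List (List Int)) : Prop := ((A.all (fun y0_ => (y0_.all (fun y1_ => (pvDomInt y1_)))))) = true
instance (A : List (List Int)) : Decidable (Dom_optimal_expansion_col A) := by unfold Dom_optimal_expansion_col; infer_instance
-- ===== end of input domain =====

-- B builds a per-column zero-count table in one row-major sweep, then selects the best column in a second scan (alternative decomposition, same cost).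
-- Pre_ excludes ragged matrices whose first len(A) rows are shorter than len(A): Python A raises IndexError there (so does B).


-- ===== PORT A =====
def optimal_expansion_col (A : List (List Int)) : Int × Int :=
  (PySem.List.pyRange 0 (A.length : Int) 1).foldl
    (fun (st : Int × Int) col =>
      let count : Int :=
        (PySem.List.pyRange 0 (A.length : Int) 1).foldl
          (fun cnt row =>
            if PySem.List.pyGetD (PySem.List.pyGetD A row []) col 1 = 0 then cnt + 1 else cnt) 0
      if count > st.2 then (col, count) else st)
    (0, 0)

-- ===== PORT B =====
def optimal_expansion_col_alt (A : List (List Int)) : Int × Int :=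
  let n : Int := (A.length : Int)
  let counts : List Int :=
    (PySem.List.pyRange 0 n 1).foldl
      (fun counts row =>
        (PySem.List.pyRange 0 n 1).map
          (fun col =>
            PySem.List.pyGetD counts col 0 +
              (if PySem.List.pyGetD (PySem.List.pyGetD A row []) col 1 = 0 then 1 else 0)))
      (List.replicate A.length 0)
  (PySem.List.pyRange 0 n 1).foldl
    (fun (st : Int × Int) col =>
      if PySem.List.pyGetD counts col 0 > st.2 then (col, PySem.List.pyGetD counts col 0) else st)
    (0, 0)

-- ===== PRECONDITION & SPEC =====
-- Pre_ excludes exactly the ragged inputs on which the Python A raises IndexError (some row shorter than len(A)).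
def Pre_optimal_expansion_col (A : List (List Int)) : Prop :=
  ∀ row ∈ A, A.length ≤ row.length
instance (A : List (List Int)) : Decidable (Pre_optimal_expansion_col A) := by
  unfold Pre_optimal_expansion_col; infer_instance
def pvWitness_optimal_expansion_col : List (List Int) := [[1, 0], [0, 0]]
def Spec_optimal_expansion_col (A : List (List Int)) (out : Int × Int) : Prop := out = optimal_expansion_col_alt A
instance (A : List (List Int)) (out : Int × Int) : Decidable (Spec_optimal_expansion_col A out) := by unfold Spec_optimal_expansion_col; infer_instance

-- ===== CLAIM (what is proved, stated in full; the proofs are below) =====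
def Claim_equal_optimal_expansion_col : Prop := ∀ (A : List (List Int)), Dom_optimal_expansion_col A → Pre_optimal_expansion_col A → Spec_optimal_expansion_col A (optimal_expansion_col A)

-- ===== LEMMAS AND PROOFS =====

-- A's inner loop: the zero count of column `col`.
def pvCnt (A : List (List Int)) (col : Int) : Int :=
  (PySem.List.pyRange 0 (A.length : Int) 1).foldl
    (fun cnt row =>
      if PySem.List.pyGetD (PySem.List.pyGetD A row []) col 1 = 0 then cnt + 1 else cnt) 0

-- B's row-major build, folded over an arbitrary row list, maps any per-column table forward.
theorem pvBuild_eq (A : List (List Int)) (n : Int) (rs : List Int) (g : Int → Int) :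
    rs.foldl
      (fun counts row =>
        (PySem.List.pyRange 0 n 1).map
          (fun col =>
            PySem.List.pyGetD counts col 0 +
              (if PySem.List.pyGetD (PySem.List.pyGetD A row []) col 1 = 0 then 1 else 0)))
      ((PySem.List.pyRange 0 n 1).map g)
    = (PySem.List.pyRange 0 n 1).map
        (fun col =>
          rs.foldl
            (fun cnt row =>
              if PySem.List.pyGetD (PySem.List.pyGetD A row []) col 1 = 0 then cnt + 1 else cnt)
            (g col)) := by
  induction rs generalizing g with
  | nil => simp
  | cons r rs ih =>
    simp only [List.foldl_cons]
    have hstep :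
        (PySem.List.pyRange 0 n 1).map
          (fun col =>
            PySem.List.pyGetD ((PySem.List.pyRange 0 n 1).map g) col 0 +
              (if PySem.List.pyGetD (PySem.List.pyGetD A r []) col 1 = 0 then 1 else 0))
        = (PySem.List.pyRange 0 n 1).map
            (fun col =>
              g col + (if PySem.List.pyGetD (PySem.List.pyGetD A r []) col 1 = 0 then 1 else 0)) := by
      apply List.map_congr_left
      intro col hcol
      rw [PySem.List.mem_pyRange_one] at hcol
      rw [PySem.List.pyGetD_map_pyRange_of_nonneg g n col 0 hcol.1 hcol.2]
    rw [hstep, ih]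
    apply List.map_congr_left
    intro col _
    congr 1
    split <;> ring

theorem optimal_expansion_col_eq_alt (A : List (List Int)) :
    optimal_expansion_col A = optimal_expansion_col_alt A := by
  simp only [optimal_expansion_col, optimal_expansion_col_alt]
  have hrep : List.replicate A.length (0 : Int)
      = (PySem.List.pyRange 0 (A.length : Int) 1).map (fun _ => (0 : Int)) := by
    rw [List.map_const', PySem.List.length_pyRange_one]
    simp
  rw [hrep, pvBuild_eq A (A.length : Int) _ (fun _ => 0)]
  apply PySem.List.foldl_congr_mem
  intro st col hcol
  rw [PySem.List.mem_pyRange_one] at hcol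
  rw [PySem.List.pyGetD_map_pyRange_of_nonneg _ _ col 0 hcol.1 hcol.2]

-- ===== VERDICT (by name: the statement is the Claim_ definition above) =====
theorem optimal_expansion_col_spec : Claim_equal_optimal_expansion_col := by
  intro A _ _
  exact optimal_expansion_col_eq_alt A
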